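-- pv_equiv track=rewrite | github.com/markodjukanovic90/VGLCS | src/BS/utils.py | build_next_occurrence
-- ===== SOURCE A (Python) =====
-- def build_next_occurrence(sequences, alphabet):
--     """
--     Build a 3D dictionary: next_occurrence[i][j][a] = next position of 'a' in s_i at or after j (1-based).
--
--     Args:
--         sequences: list of strings or character lists (indexed from 0, but we use 1-based logic)
--         alphabet: set of all possible characters Σ
--
--     Returns:
--         next_occurrence: list of 2D dicts for each sequence s_i
--     """
--     next_occurrence = []
--
--     for s in sequences:
--         n = len(s)
--         # Initialize next_pos[a] = n+1 for all a in Σ (means "not found")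
--         next_pos = {a: n + 1 for a in alphabet}
--         occ_table = [dict() for _ in range(n + 2)]  # 1-based indexing, plus extra for position n+1
--
--         # Traverse sequence in reverse to fill next_pos map at each position
--         for i in range(n, 0, -1):  # from n to 1
--             next_pos[s[i - 1]] = i  # Update next position of current symbol ==> FIX??
--             occ_table[i] = next_pos.copy()
--
--         # Add dummy last row (position n+1) — no further occurrences
--         occ_table[n + 1] = {a: n + 1 for a in alphabet}
--         next_occurrence.append(occ_table)
--
--     return next_occurrence
-- ===== SOURCE B (Python) =====
-- def build_next_occurrence(sequences, alphabet):
--     """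
--     next_occurrence[i][j][a] = next position of 'a' in s_i at or after j (1-based).
--
--     Each row is computed on its own by walking the sequence backwards from the
--     end down to the row's position: alphabet symbols start at n+1 ("not found")
--     and every symbol seen on the way gets its position recorded, so the closest
--     occurrence (the last one written) wins.
--     """
--     tables = []
--     for s in sequences:
--         n = len(s)
--         table = [{}]
--         for i in range(1, n + 2):
--             row = {a: n + 1 for a in alphabet}
--             for j in range(n, i - 1, -1):
--                 row[s[j - 1]] = j
--             table.append(row)
--         tables.append(table)
--     return tables
-- ===== Notes on version B (the rewrite author's own statement) =====
-- stated objective: simpler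
-- what changed: B computes every row of the table independently by a backward scan of that row's own suffix (brute force, no shared state), instead of A's single reverse sweep that mutates one running dict and snapshots a copy of it at each position.
import Mathlib
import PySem

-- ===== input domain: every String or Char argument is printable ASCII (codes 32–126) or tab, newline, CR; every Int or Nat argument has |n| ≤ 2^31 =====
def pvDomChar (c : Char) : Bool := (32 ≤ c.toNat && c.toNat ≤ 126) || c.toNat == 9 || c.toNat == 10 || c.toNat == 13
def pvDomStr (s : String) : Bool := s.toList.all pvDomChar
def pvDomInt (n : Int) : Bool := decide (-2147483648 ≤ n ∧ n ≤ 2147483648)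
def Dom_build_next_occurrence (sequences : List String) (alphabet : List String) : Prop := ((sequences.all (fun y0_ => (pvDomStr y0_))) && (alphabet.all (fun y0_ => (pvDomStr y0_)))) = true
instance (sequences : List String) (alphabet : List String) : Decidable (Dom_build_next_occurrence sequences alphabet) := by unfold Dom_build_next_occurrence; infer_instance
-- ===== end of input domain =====

-- B computes every row of the table independently by a backward scan of its own suffix,
-- instead of A's single reverse sweep snapshotting a mutated dict (objective: simpler).

-- Python's s[i-1] yields a one-character string; pvOne is that conversion (shared by both ports).
def pvOne (c : Char) : String := String.ofList [c]

-- ===== PORT A =====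
def build_next_occurrence (sequences : List String) (alphabet : List String) : List (List (List (String × Int))) :=
  sequences.foldl (fun next_occurrence s =>
    let cs := s.toList
    let n : Int := PySem.Str.len s
    let next_pos : PySem.Dict String Int :=
      alphabet.foldl (fun d a => d.insert a (n + 1)) PySem.Dict.empty
    let occ_table : List (PySem.Dict String Int) :=
      (PySem.List.pyRange 0 (n + 2) 1).map (fun _ => PySem.Dict.empty)
    let st := (PySem.List.pyRange n 0 (-1)).foldl
      (fun (st : PySem.Dict String Int × List (PySem.Dict String Int)) i =>
        -- s[i-1]: always in range for i in range(n, 0, -1), so the total pyGetD is exact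
        let np := st.1.insert (pvOne (PySem.List.pyGetD cs (i - 1) ' ')) i
        (np, PySem.List.pySetD st.2 i np))
      (next_pos, occ_table)
    let occ := PySem.List.pySetD st.2 (n + 1)
      (alphabet.foldl (fun d a => d.insert a (n + 1)) PySem.Dict.empty)
    next_occurrence ++ [occ.map (fun d => d.items)]) []

-- ===== PORT B =====
def build_next_occurrence_alt (sequences : List String) (alphabet : List String) : List (List (List (String × Int))) :=
  sequences.foldl (fun tables s =>
    let cs := s.toList
    let n : Int := PySem.Str.len s
    let table := (PySem.List.pyRange 1 (n + 2) 1).foldl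
      (fun table i =>
        let row := alphabet.foldl (fun d a => d.insert a (n + 1)) PySem.Dict.empty
        let row := (PySem.List.pyRange n (i - 1) (-1)).foldl
          (fun (row : PySem.Dict String Int) j =>
            -- s[j-1]: always in range for j in range(n, i-1, -1) with i ≥ 1, so the total pyGetD is exact
            row.insert (pvOne (PySem.List.pyGetD cs (j - 1) ' ')) j)
          row
        table ++ [row])
      [PySem.Dict.empty]
    tables ++ [table.map (fun d => d.items)]) []

-- ===== PRECONDITION & SPEC =====
def Spec_build_next_occurrence (sequences : List String) (alphabet : List String) (out : List (List (List (String × Int)))) : Prop := out = build_next_occurrence_alt sequences alphabet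
instance (sequences : List String) (alphabet : List String) (out : List (List (List (String × Int)))) : Decidable (Spec_build_next_occurrence sequences alphabet out) := by unfold Spec_build_next_occurrence; infer_instance

-- ===== CLAIM (what is proved, stated in full; the proofs are below) =====
def Claim_equal_build_next_occurrence : Prop := ∀ (sequences : List String) (alphabet : List String), Dom_build_next_occurrence sequences alphabet → Spec_build_next_occurrence sequences alphabet (build_next_occurrence sequences alphabet)

-- ===== LEMMAS AND PROOFS =====

-- the dict obtained by inserting positions n, n-1, …, i (B's row i; also A's running dict
-- right after A has processed position i of its reverse sweep)
def pvD (cs : List Char) (base : PySem.Dict String Int) (i : Int) : PySem.Dict String Int :=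
  (PySem.List.pyRange (cs.length : Int) (i - 1) (-1)).foldl
    (fun (row : PySem.Dict String Int) j =>
      row.insert (pvOne (PySem.List.pyGetD cs (j - 1) ' ')) j) base

theorem pvD_top (cs : List Char) (base : PySem.Dict String Int) :
    pvD cs base ((cs.length : Int) + 1) = base := by
  unfold pvD
  rw [PySem.List.pyRange_neg_one_eq_nil (by omega)]
  rfl

-- peeling the LAST element of the countdown range: range(a, b-1, -1) = range(a, b, -1) ++ [b]
theorem pyRange_neg_one_snoc (a b : Int) (h : b ≤ a) :
    PySem.List.pyRange a (b - 1) (-1) = PySem.List.pyRange a b (-1) ++ [b] := by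
  rw [PySem.List.pyRange_neg_one_eq_reverse, PySem.List.pyRange_neg_one_eq_reverse,
    show b - 1 + 1 = b by ring, PySem.List.pyRange_one_cons (by omega)]
  simp

theorem pvD_step (cs : List Char) (base : PySem.Dict String Int) (i : Int)
    (_h1 : 1 ≤ i) (h2 : i ≤ (cs.length : Int)) :
    pvD cs base i = (pvD cs base (i + 1)).insert (pvOne (PySem.List.pyGetD cs (i - 1) ' ')) i := by
  unfold pvD
  rw [pyRange_neg_one_snoc _ i h2, List.foldl_append, List.foldl_cons, List.foldl_nil,
    show i + 1 - 1 = i by ring]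

-- A's reverse sweep: state invariant over the countdown m, m-1, …, 1
theorem A_loop (cs : List Char) (base : PySem.Dict String Int)
    (m : Nat) (hm : m ≤ cs.length)
    (occ : List (PySem.Dict String Int)) (hocc : m < occ.length) :
    ∃ occ',
      (PySem.List.pyRange (m : Int) 0 (-1)).foldl
        (fun (st : PySem.Dict String Int × List (PySem.Dict String Int)) i =>
          let np := st.1.insert (pvOne (PySem.List.pyGetD cs (i - 1) ' ')) i
          (np, PySem.List.pySetD st.2 i np))
        (pvD cs base ((m : Int) + 1), occ)
        = (pvD cs base 1, occ') ∧
      occ'.length = occ.length ∧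
      ∀ j : Nat, occ'[j]? = if 1 ≤ j ∧ j ≤ m then some (pvD cs base (j : Int)) else occ[j]? := by
  induction m generalizing occ with
  | zero =>
    refine ⟨occ, ?_, rfl, ?_⟩
    · rw [PySem.List.pyRange_neg_one_eq_nil (by omega)]
      rfl
    · intro j
      rw [if_neg (by omega)]
  | succ m ih =>
    rw [show ((m + 1 : Nat) : Int) = ((m : Int) + 1) by push_cast; ring]
    rw [PySem.List.pyRange_neg_one_cons (by omega), List.foldl_cons]
    have hstep : (pvD cs base ((m : Int) + 1 + 1)).insert
        (pvOne (PySem.List.pyGetD cs ((m : Int) + 1 - 1) ' ')) ((m : Int) + 1)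
        = pvD cs base ((m : Int) + 1) :=
      (pvD_step cs base ((m : Int) + 1) (by omega) (by omega)).symm
    simp only []
    rw [hstep]
    have hset : PySem.List.pySetD occ ((m : Int) + 1) (pvD cs base ((m : Int) + 1))
        = occ.set (m + 1) (pvD cs base ((m : Int) + 1)) := by
      rw [show ((m : Int) + 1) = ((m + 1 : Nat) : Int) by push_cast; ring]
      rw [PySem.List.pySetD_natCast]
    rw [hset, show ((m : Int) + 1 - 1) = ((m : Nat) : Int) by ring]
    obtain ⟨occ', heq, hlen, hval⟩ := ih (by omega)
      (occ.set (m + 1) (pvD cs base ((m : Int) + 1))) (by simpa using by omega)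
    refine ⟨occ', heq, by simpa using hlen, ?_⟩
    intro j
    rw [hval j]
    by_cases hj1 : 1 ≤ j ∧ j ≤ m
    · rw [if_pos hj1, if_pos (by omega)]
    · rw [if_neg hj1]
      by_cases hj2 : j = m + 1
      · subst hj2
        rw [if_pos (by omega), List.getElem?_set_self (by simpa using hocc)]
        rw [show ((m + 1 : Nat) : Int) = ((m : Int) + 1) by push_cast; ring]
      · rw [if_neg (by omega), List.getElem?_set_ne (by omega)]

-- per-sequence equality of the two table constructions
theorem table_eq (s : String) (alphabet : List String) :
    (let cs := s.toList
     let n : Int := PySem.Str.len s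
     let next_pos : PySem.Dict String Int :=
       alphabet.foldl (fun d a => d.insert a (n + 1)) PySem.Dict.empty
     let occ_table : List (PySem.Dict String Int) :=
       (PySem.List.pyRange 0 (n + 2) 1).map (fun _ => PySem.Dict.empty)
     let st := (PySem.List.pyRange n 0 (-1)).foldl
       (fun (st : PySem.Dict String Int × List (PySem.Dict String Int)) i =>
         let np := st.1.insert (pvOne (PySem.List.pyGetD cs (i - 1) ' ')) i
         (np, PySem.List.pySetD st.2 i np))
       (next_pos, occ_table)
     let occ := PySem.List.pySetD st.2 (n + 1)
       (alphabet.foldl (fun d a => d.insert a (n + 1)) PySem.Dict.empty)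
     occ.map (fun d => d.items))
    = (let cs := s.toList
       let n : Int := PySem.Str.len s
       let table := (PySem.List.pyRange 1 (n + 2) 1).foldl
         (fun table i =>
           let row := alphabet.foldl (fun d a => d.insert a (n + 1)) PySem.Dict.empty
           let row := (PySem.List.pyRange n (i - 1) (-1)).foldl
             (fun (row : PySem.Dict String Int) j =>
               row.insert (pvOne (PySem.List.pyGetD cs (j - 1) ' ')) j)
             row
           table ++ [row])
         [PySem.Dict.empty]
       table.map (fun d => d.items)) := by
  set cs := s.toList with hcs
  have hn : PySem.Str.len s = (cs.length : Int) := by simp [hcs]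
  simp only [hn]
  set base : PySem.Dict String Int :=
    alphabet.foldl (fun d a => d.insert a ((cs.length : Int) + 1)) PySem.Dict.empty with hbase
  -- B's rows are pvD by definition
  have hB : ((PySem.List.pyRange 1 ((cs.length : Int) + 2) 1).foldl
      (fun table i =>
        table ++ [(PySem.List.pyRange (cs.length : Int) (i - 1) (-1)).foldl
          (fun (row : PySem.Dict String Int) j =>
            row.insert (pvOne (PySem.List.pyGetD cs (j - 1) ' ')) j) base])
      [PySem.Dict.empty])
      = [PySem.Dict.empty] ++ (List.range (cs.length + 1)).map (fun (k : Nat) => pvD cs base (1 + (k : Int))) := by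
    rw [PySem.List.foldl_append_singleton_eq_map, PySem.List.pyRange_one,
      show ((cs.length : Int) + 2 - 1).toNat = cs.length + 1 by omega, List.map_map]
    rfl
  -- A's occ list, elementwise
  have hlen0 : ((PySem.List.pyRange 0 ((cs.length : Int) + 2) 1).map
      (fun _ => (PySem.Dict.empty : PySem.Dict String Int))).length = cs.length + 2 := by
    rw [List.length_map, PySem.List.length_pyRange_one]
    omega
  have hinit : base = pvD cs base ((cs.length : Int) + 1) := (pvD_top cs base).symm
  obtain ⟨occ', heq, hlen, hval⟩ := A_loop cs base cs.length (le_refl _)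
    ((PySem.List.pyRange 0 ((cs.length : Int) + 2) 1).map (fun _ => PySem.Dict.empty))
    (by omega)
  have hocclen : occ'.length = cs.length + 2 := by rw [hlen]; exact hlen0
  conv_lhs => rw [hinit]
  rw [heq, hB]
  have hpair : ((pvD cs base 1), occ').2 = occ' := rfl
  rw [hpair, show ((cs.length : Int) + 1) = ((cs.length + 1 : Nat) : Int) by push_cast; ring,
    PySem.List.pySetD_natCast]
  congr 1
  apply List.ext_getElem?
  intro j
  by_cases hj0 : j = 0
  · subst hj0
    rw [List.getElem?_set_ne (by omega), hval 0, if_neg (by omega)]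
    rw [List.getElem?_eq_getElem (by rw [hlen0]; omega), List.getElem_map]
    rw [List.getElem?_append_left (by simp)]
    rfl
  · by_cases hj1 : 1 ≤ j ∧ j ≤ cs.length
    · rw [List.getElem?_set_ne (by omega), hval j, if_pos hj1]
      rw [List.getElem?_append_right (by simp only [List.length_singleton]; omega),
        List.getElem?_map, List.getElem?_range (by simp only [List.length_singleton]; omega)]
      simp only [List.length_singleton, Option.map_some]
      congr 2
      omega
    · by_cases hj2 : j = cs.length + 1
      · subst hj2
        rw [List.getElem?_set_self (by omega)]
        rw [List.getElem?_append_right (by simp only [List.length_singleton]; omega),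
          List.getElem?_map, List.getElem?_range (by simp only [List.length_singleton]; omega)]
        simp only [List.length_singleton, Option.map_some]
        rw [hinit]
        congr 2
        push_cast
        omega
      · rw [List.getElem?_set_ne (by omega), hval j, if_neg (by omega)]
        rw [List.getElem?_eq_none (by rw [hlen0]; omega), List.getElem?_eq_none (by
          simp only [List.length_append, List.length_map, List.length_singleton,
            List.length_range]
          omega)]

-- ===== VERDICT (by name: the statement is the Claim_ definition above) =====
theorem build_next_occurrence_spec : Claim_equal_build_next_occurrence := by
  intro sequences alphabet _
  unfold Spec_build_next_occurrence
  unfold build_next_occurrence build_next_occurrence_alt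
  simp only []
  rw [PySem.List.foldl_append_singleton_eq_map, PySem.List.foldl_append_singleton_eq_map]
  apply List.map_congr_left
  intro s _
  exact table_eq s alphabet
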